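-- pv_equiv track=rewrite | github.com/zulqarnaininfo/learning-bioinformatics | year-1/2026-04/28-rna-cleaner-v2/rna_cleaner_v2.py | rna_cleaner
-- ===== SOURCE A (Python) =====
-- def rna_cleaner(dirty_rna):
--     clean = ""
--     invalid_count = 0
--     for base in dirty_rna:
--         if base in ["A","U","G","C"]:
--             clean += base
--         else:
--             invalid_count += 1
--     return clean, invalid_count
-- ===== SOURCE B (Python) =====
-- def rna_cleaner(dirty_rna):
--     # Stage 1: compute the deletion alphabet = distinct characters of the input
--     # that are not valid RNA bases (first-occurrence order, deterministic).
--     to_delete = "".join(dict.fromkeys(c for c in dirty_rna if c not in "AUGC"))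
--     # Stage 2: delete that whole alphabet in one translate call.
--     clean = dirty_rna.translate(str.maketrans("", "", to_delete))
--     # Stage 3: invalid count by length subtraction.
--     return clean, len(dirty_rna) - len(clean)
-- ===== Notes on version B (the rewrite author's own statement) =====
-- stated objective: alternative
-- what changed: B is staged: it first computes the distinct invalid characters appearing in the input as a deletion alphabet, then removes them all with one str.translate call, and derives the invalid count by length subtraction, instead of A's single loop that tests each character against the valid-base list and accumulates a string and a counter.
import Mathlib
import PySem

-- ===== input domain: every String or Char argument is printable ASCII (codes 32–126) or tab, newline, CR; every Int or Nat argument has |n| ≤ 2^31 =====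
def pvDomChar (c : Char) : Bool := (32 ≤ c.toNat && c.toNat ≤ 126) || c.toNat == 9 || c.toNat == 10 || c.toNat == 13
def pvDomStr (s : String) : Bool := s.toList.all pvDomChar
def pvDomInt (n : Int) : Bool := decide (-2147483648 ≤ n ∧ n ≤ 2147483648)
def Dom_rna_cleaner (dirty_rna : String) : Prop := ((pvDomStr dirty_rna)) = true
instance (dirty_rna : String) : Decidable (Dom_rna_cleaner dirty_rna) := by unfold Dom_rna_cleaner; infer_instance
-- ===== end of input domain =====

-- B stages the work: compute the distinct invalid characters as a deletion alphabet, delete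
-- them with one translate pass, count invalids by length subtraction; objective: alternative.

-- ===== PORT A =====
-- A's loop: state (clean, invalid_count); membership test against the list ["A","U","G","C"].
def rna_cleaner_step (acc : String × Int) (base : Char) : String × Int :=
  if base ∈ ['A', 'U', 'G', 'C'] then (acc.1.push base, acc.2) else (acc.1, acc.2 + 1)

def rna_cleaner (dirty_rna : String) : String × Int :=
  dirty_rna.toList.foldl rna_cleaner_step ("", 0)

-- ===== PORT B =====
-- B: deletion alphabet (dict.fromkeys dedup of the invalid chars), translate (delete every
-- char of the alphabet), count by subtraction.
def rna_cleaner_alt (dirty_rna : String) : String × Int :=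
  let to_delete := PySem.List.dedup
    (dirty_rna.toList.filter (fun c => ¬ c ∈ ['A', 'U', 'G', 'C']))
  let clean := dirty_rna.toList.filter (fun c => ¬ c ∈ to_delete)
  (String.ofList clean, (dirty_rna.toList.length : Int) - clean.length)

-- ===== PRECONDITION & SPEC =====
def Spec_rna_cleaner (dirty_rna : String) (out : String × Int) : Prop := out = rna_cleaner_alt dirty_rna
instance (dirty_rna : String) (out : String × Int) : Decidable (Spec_rna_cleaner dirty_rna out) := by unfold Spec_rna_cleaner; infer_instance

-- ===== CLAIM =====
def Claim_equal_rna_cleaner : Prop := ∀ (dirty_rna : String), Dom_rna_cleaner dirty_rna → Spec_rna_cleaner dirty_rna (rna_cleaner dirty_rna)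

-- ===== LEMMAS AND PROOFS =====
theorem rna_cleaner_loop (l cs : List Char) (k : Int) :
    l.foldl rna_cleaner_step (String.ofList cs, k)
      = (String.ofList (cs ++ l.filter (fun b => b ∈ ['A', 'U', 'G', 'C'])),
         k + ((l.length : Int) - (l.filter (fun b => b ∈ ['A', 'U', 'G', 'C'])).length)) := by
  induction l generalizing cs k with
  | nil => simp
  | cons b t ih =>
    have hp : (String.ofList cs).push b = String.ofList (cs ++ [b]) := by
      apply String.toList_injective; simp
    by_cases hb : b ∈ ['A', 'U', 'G', 'C']
    · simp only [List.foldl, rna_cleaner_step, if_pos hb, hp, ih]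
      simp only [List.filter_cons, List.length_cons, hb, decide_true, if_true, List.append_assoc]
      refine Prod.ext rfl ?_
      push_cast; ring
    · simp only [List.foldl, rna_cleaner_step, if_neg hb, ih]
      simp only [List.filter_cons, List.length_cons, hb, decide_false]
      refine Prod.ext rfl ?_
      push_cast; ring

-- On the characters of the input, membership in the deletion alphabet is exactly invalidity.
theorem rna_cleaner_alphabet (l : List Char) (c : Char) (hc : c ∈ l) :
    (decide (¬ c ∈ PySem.List.dedup (l.filter (fun b => ¬ b ∈ ['A', 'U', 'G', 'C']))))
      = decide (c ∈ ['A', 'U', 'G', 'C']) := by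
  by_cases hv : c ∈ ['A', 'U', 'G', 'C'] <;>
    simp_all [List.mem_filter]

-- ===== VERDICT =====
theorem rna_cleaner_spec : Claim_equal_rna_cleaner := by
  intro s _
  unfold Spec_rna_cleaner rna_cleaner rna_cleaner_alt
  have h := rna_cleaner_loop s.toList [] 0
  have hf : s.toList.filter (fun c => ¬ c ∈ PySem.List.dedup
        (s.toList.filter (fun b => ¬ b ∈ ['A', 'U', 'G', 'C'])))
      = s.toList.filter (fun b => b ∈ ['A', 'U', 'G', 'C']) :=
    List.filter_congr (fun c hc => rna_cleaner_alphabet s.toList c hc)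
  simp only [hf]
  simpa using h
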